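-- pv_equiv track=rewrite | github.com/galvandvictoria-alt/Computational-Geometry | docs/10_corners/context-free_grammar.py | longitud_arco
-- ===== SOURCE A (Python) =====
-- def longitud_arco(contorno, idx_k, idx_k1):
--     """Longitud del arco (número de puntos) entre idx_k e idx_k1."""
--     n = len(contorno)
--     s = 0
--     idx = idx_k
--     while idx != idx_k1:
--         idx = (idx + 1) % n
--         s += 1
--     return s
-- ===== SOURCE B (Python) =====
-- def longitud_arco(contorno, idx_k, idx_k1):
--     """Longitud del arco (número de puntos) entre idx_k e idx_k1."""
--     return (idx_k1 - idx_k) % len(contorno)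
-- ===== Notes on version B (the rewrite author's own statement) =====
-- stated objective: faster
-- what changed: Replaced the step-by-step while-loop walk around the contour with the closed-form modular difference (idx_k1 - idx_k) % n.
-- intended difference: When idx_k is congruent to idx_k1 modulo n but not equal to it (an out-of-range alias of the same contour point), A walks a full extra lap and returns n, while B returns 0, the arc length between identical positions, which is the intended value. — e.g. on longitud_arco([1, 2], 4, 0): A returns 2, B returns 0
-- outside the precondition, e.g. on longitud_arco([], 5, 5): A returns 0, B raises ZeroDivisionError; on longitud_arco([1, 2, 3], 0, 5): A does not finish within the time limit, B returns 2
import Mathlib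
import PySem

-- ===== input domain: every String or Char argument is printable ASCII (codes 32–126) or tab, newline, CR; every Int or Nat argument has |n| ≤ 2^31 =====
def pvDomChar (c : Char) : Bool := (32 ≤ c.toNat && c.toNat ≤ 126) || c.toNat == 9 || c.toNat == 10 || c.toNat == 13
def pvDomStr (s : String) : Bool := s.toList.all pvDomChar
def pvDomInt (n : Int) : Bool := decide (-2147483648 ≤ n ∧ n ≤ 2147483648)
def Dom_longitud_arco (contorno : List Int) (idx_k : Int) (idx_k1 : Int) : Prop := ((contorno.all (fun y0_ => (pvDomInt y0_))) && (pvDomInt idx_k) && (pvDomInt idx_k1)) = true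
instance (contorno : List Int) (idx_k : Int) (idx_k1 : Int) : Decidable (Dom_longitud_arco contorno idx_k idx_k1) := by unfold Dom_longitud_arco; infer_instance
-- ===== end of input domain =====

-- B replaces A's O(n) step-by-step walk around the contour by the closed-form
-- modular difference (idx_k1 - idx_k) % n.

-- ===== PORT A =====
-- A's while-loop, step for step; the fuel argument only makes the (possibly
-- divergent) Python loop total in Lean — inside Pre_ the loop takes at most
-- n steps, so fuel n+1 is never exhausted there.
def pvLoopA (n idxK1 : Int) : Nat → Int → Int → Int
  | 0, _, s => s
  | f + 1, idx, s =>
      if idx = idxK1 then s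
      else pvLoopA n idxK1 f (PySem.Int.mod (idx + 1) n) (s + 1)

def longitud_arco (contorno : List Int) (idx_k : Int) (idx_k1 : Int) : Int :=
  let n : Int := PySem.List.len contorno
  pvLoopA n idx_k1 (contorno.length + 1) idx_k 0

-- ===== PORT B =====
def longitud_arco_alt (contorno : List Int) (idx_k : Int) (idx_k1 : Int) : Int :=
  PySem.Int.mod (idx_k1 - idx_k) (PySem.List.len contorno)

-- ===== PRECONDITION & SPEC =====
-- Pre_ is exactly the set of inputs on which A terminates AND B returns:
-- outside it A raises ZeroDivisionError (empty contorno with idx_k ≠ idx_k1)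
-- or diverges (idx_k1 not a valid index and ≠ idx_k, so never reached), and
-- on empty contorno with idx_k = idx_k1 (A returns 0) B itself raises
-- ZeroDivisionError.
def Pre_longitud_arco (contorno : List Int) (idx_k : Int) (idx_k1 : Int) : Prop :=
  contorno ≠ [] ∧ ((0 ≤ idx_k1 ∧ idx_k1 < contorno.length) ∨ idx_k = idx_k1)
instance (contorno : List Int) (idx_k : Int) (idx_k1 : Int) : Decidable (Pre_longitud_arco contorno idx_k idx_k1) := by unfold Pre_longitud_arco; infer_instance

def pvWitness_longitud_arco : List Int × Int × Int := ([10, 20, 30, 40], 3, 1)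

-- When idx_k ≡ idx_k1 (mod n) but idx_k ≠ idx_k1 (an out-of-range alias of the
-- same contour point), A walks a full extra lap and returns n, while B returns
-- 0, the arc length between identical positions, which is the intended value.
def D_longitud_arco (contorno : List Int) (idx_k : Int) (idx_k1 : Int) : Prop :=
  idx_k ≠ idx_k1 ∧ (idx_k1 - idx_k) % (contorno.length : Int) = 0
instance (contorno : List Int) (idx_k : Int) (idx_k1 : Int) : Decidable (D_longitud_arco contorno idx_k idx_k1) := by unfold D_longitud_arco; infer_instance

def Spec_longitud_arco (contorno : List Int) (idx_k : Int) (idx_k1 : Int) (out : Int) : Prop := ¬ D_longitud_arco contorno idx_k idx_k1 → out = longitud_arco_alt contorno idx_k idx_k1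
instance (contorno : List Int) (idx_k : Int) (idx_k1 : Int) (out : Int) : Decidable (Spec_longitud_arco contorno idx_k idx_k1 out) := by unfold Spec_longitud_arco; infer_instance

def pvDiffWitness_longitud_arco : List Int × Int × Int := ([1, 2], 4, 0)
def pvDiffWitnessOut_longitud_arco : Int × Int := (2, 0)

-- ===== CLAIM (what is proved, stated in full; the proofs are below) =====
def Claim_unchanged_longitud_arco : Prop := ∀ (contorno : List Int) (idx_k : Int) (idx_k1 : Int), Dom_longitud_arco contorno idx_k idx_k1 → Pre_longitud_arco contorno idx_k idx_k1 → Spec_longitud_arco contorno idx_k idx_k1 (longitud_arco contorno idx_k idx_k1)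
def Claim_changed_longitud_arco : Prop := Dom_longitud_arco (pvDiffWitness_longitud_arco.1) (pvDiffWitness_longitud_arco.2.1) (pvDiffWitness_longitud_arco.2.2) ∧ Pre_longitud_arco (pvDiffWitness_longitud_arco.1) (pvDiffWitness_longitud_arco.2.1) (pvDiffWitness_longitud_arco.2.2) ∧ D_longitud_arco (pvDiffWitness_longitud_arco.1) (pvDiffWitness_longitud_arco.2.1) (pvDiffWitness_longitud_arco.2.2) ∧ longitud_arco (pvDiffWitness_longitud_arco.1) (pvDiffWitness_longitud_arco.2.1) (pvDiffWitness_longitud_arco.2.2) = pvDiffWitnessOut_longitud_arco.1 ∧ longitud_arco_alt (pvDiffWitness_longitud_arco.1) (pvDiffWitness_longitud_arco.2.1) (pvDiffWitness_longitud_arco.2.2) = pvDiffWitnessOut_longitud_arco.2 ∧ pvDiffWitnessOut_longitud_arco.1 ≠ pvDiffWitnessOut_longitud_arco.2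
def Claim_exact_longitud_arco : Prop := ∀ (contorno : List Int) (idx_k : Int) (idx_k1 : Int), Dom_longitud_arco contorno idx_k idx_k1 → Pre_longitud_arco contorno idx_k idx_k1 → D_longitud_arco contorno idx_k idx_k1 → longitud_arco contorno idx_k idx_k1 ≠ longitud_arco_alt contorno idx_k idx_k1

-- ===== LEMMAS AND PROOFS =====

-- The forward arc distance from idx to idxK1 on a circle of n points.
def pvDist (n idxK1 idx : Int) : Int :=
  if idx ≤ idxK1 then idxK1 - idx else idxK1 - idx + n

lemma pvLoopA_eq_dist (n idxK1 : Int) (hn : 0 < n) (h1 : 0 ≤ idxK1) (h1' : idxK1 < n) :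
    ∀ (f : Nat) (idx s : Int), 0 ≤ idx → idx < n → pvDist n idxK1 idx ≤ (f : Int) →
      pvLoopA n idxK1 f idx s = s + pvDist n idxK1 idx := by
  intro f
  induction f with
  | zero =>
      intro idx s h0 h0' hf
      have : pvDist n idxK1 idx = 0 := by unfold pvDist at *; split_ifs at * <;> omega
      simp [pvLoopA, this]
  | succ f ih =>
      intro idx s h0 h0' hf
      by_cases heq : idx = idxK1
      · subst heq
        simp [pvLoopA, pvDist]
      · have hmod : PySem.Int.mod (idx + 1) n = (idx + 1) % n :=
          PySem.Int.mod_eq_emod_of_pos hn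
        have hnext : (idx + 1) % n = if idx + 1 < n then idx + 1 else 0 := by
          split_ifs with hlt
          · exact Int.emod_eq_of_lt (by omega) hlt
          · have : idx + 1 = n := by omega
            simp [this]
        rw [pvLoopA, if_neg heq, hmod, hnext]
        split_ifs with hlt
        · rw [ih (idx + 1) (s + 1) (by omega) hlt ?bnd]
          case bnd => unfold pvDist at *; split_ifs at * <;> omega
          unfold pvDist; split_ifs <;> omega
        · rw [ih 0 (s + 1) (by omega) hn ?bnd]
          case bnd => unfold pvDist at *; split_ifs at * <;> omega
          unfold pvDist at *; split_ifs at * <;> omega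

lemma pvDist_eq_emod (n idxK1 idx : Int) (_hn : 0 < n)
    (h0 : 0 ≤ idx) (h0' : idx < n) (h1 : 0 ≤ idxK1) (h1' : idxK1 < n) :
    pvDist n idxK1 idx = (idxK1 - idx) % n := by
  unfold pvDist
  split_ifs with hle
  · exact (Int.emod_eq_of_lt (by omega) (by omega)).symm
  · rw [← Int.add_mul_emod_self_left (b := n) (c := 1), mul_one,
        Int.emod_eq_of_lt (by omega) (by omega)]

-- A's value on a nonempty contour with a valid target index and idx_k ≠ idx_k1:
-- the modular difference, except a full lap n when the difference is ≡ 0.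
lemma longitud_arco_closed (contorno : List Int) (idx_k idx_k1 : Int)
    (hn : 0 < (contorno.length : Int))
    (h1 : 0 ≤ idx_k1) (h1' : idx_k1 < (contorno.length : Int)) (hne : idx_k ≠ idx_k1) :
    longitud_arco contorno idx_k idx_k1 =
      if (idx_k1 - idx_k) % (contorno.length : Int) = 0 then (contorno.length : Int)
      else (idx_k1 - idx_k) % (contorno.length : Int) := by
  set n : Int := (contorno.length : Int) with hndef
  unfold longitud_arco
  rw [PySem.List.len_eq, pvLoopA, if_neg hne, PySem.Int.mod_eq_emod_of_pos hn]
  have hi0 : 0 ≤ (idx_k + 1) % n := Int.emod_nonneg _ (by omega)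
  have hi1 : (idx_k + 1) % n < n := Int.emod_lt_of_pos _ hn
  rw [pvLoopA_eq_dist n idx_k1 hn h1 h1' contorno.length _ _ hi0 hi1
        (by unfold pvDist; split_ifs <;> omega),
      pvDist_eq_emod n idx_k1 _ hn hi0 hi1 h1 h1']
  -- (idx_k1 - (idx_k+1) % n) % n = (idx_k1 - idx_k - 1) % n
  have hshift : (idx_k1 - (idx_k + 1) % n) % n = (idx_k1 - (idx_k + 1)) % n := by
    rw [Int.sub_emod idx_k1 ((idx_k + 1) % n) n, Int.emod_emod_of_dvd _ dvd_rfl,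
        ← Int.sub_emod]
  rw [hshift]
  -- let r be the modular difference and q its quotient
  have hq := Int.emod_add_mul_ediv (idx_k1 - idx_k) n
  set r : Int := (idx_k1 - idx_k) % n with hrdef
  set q : Int := (idx_k1 - idx_k) / n with hqdef
  have hr0 : 0 ≤ r := Int.emod_nonneg _ (by omega)
  have hr1 : r < n := Int.emod_lt_of_pos _ hn
  by_cases hz : r = 0
  · have hsplit : idx_k1 - (idx_k + 1) = (n - 1) + n * (q - 1) := by
      have : n * (q - 1) = n * q - n := by ring
      omega
    rw [if_pos hz, hsplit, Int.add_mul_emod_self_left,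
        Int.emod_eq_of_lt (by omega) (by omega)]
    omega
  · have hsplit : idx_k1 - (idx_k + 1) = (r - 1) + n * q := by omega
    rw [if_neg hz, hsplit, Int.add_mul_emod_self_left,
        Int.emod_eq_of_lt (by omega) (by omega)]
    omega

-- ===== VERDICT (by name: the statement is the Claim_ definition above) =====
theorem longitud_arco_spec : Claim_unchanged_longitud_arco := by
  intro contorno idx_k idx_k1 _ hpre hnd
  obtain ⟨hne, hrange⟩ := hpre
  have hn : 0 < (contorno.length : Int) := by
    have : contorno.length ≠ 0 := fun h => hne (List.eq_nil_of_length_eq_zero h)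
    omega
  unfold longitud_arco_alt
  rw [PySem.List.len_eq, PySem.Int.mod_eq_emod_of_pos hn]
  by_cases heq : idx_k = idx_k1
  · subst heq
    unfold longitud_arco
    rw [PySem.List.len_eq, pvLoopA, if_pos rfl]
    simp
  · rcases hrange with h1 | h1
    · have hz : (idx_k1 - idx_k) % (contorno.length : Int) ≠ 0 := by
        intro h; exact hnd ⟨heq, h⟩
      rw [longitud_arco_closed contorno idx_k idx_k1 hn h1.1 h1.2 heq, if_neg hz]
    · exact absurd h1 heq

theorem longitud_arco_changed : Claim_changed_longitud_arco := by
  unfold Claim_changed_longitud_arco; decide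

theorem longitud_arco_tight : Claim_exact_longitud_arco := by
  intro contorno idx_k idx_k1 _ hpre hd
  obtain ⟨hne, hrange⟩ := hpre
  obtain ⟨hneq, hz⟩ := hd
  have hn : 0 < (contorno.length : Int) := by
    have : contorno.length ≠ 0 := fun h => hne (List.eq_nil_of_length_eq_zero h)
    omega
  rcases hrange with h1 | h1
  · rw [longitud_arco_closed contorno idx_k idx_k1 hn h1.1 h1.2 hneq, if_pos hz]
    unfold longitud_arco_alt
    rw [PySem.List.len_eq, PySem.Int.mod_eq_emod_of_pos hn, hz]
    omega
  · exact absurd h1 hneq
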